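-- pv_equiv track=rewrite | github.com/DaryaBelka/pp1 | 09-Test2/p3.py | f
-- ===== SOURCE A (Python) =====
-- def f(array2D):
--    sum = 0
--    sum1 = 0
--    sum2 = 0
--    sum3 = 0
--    for i in range(len(array2D)):
--       sum += array2D[i][0]
--       sum1 += array2D[i][1]
--       sum2 += array2D[i][2]
--       sum3 += array2D[i][-1]
--    return sum, sum1, sum2, sum3
--
-- array2D = [3,6,2,7], [9,5,4,0], [2,8,0,9]
-- ===== SOURCE B (Python) =====
-- def f(array2D):
--     return (sum(row[0] for row in array2D),
--             sum(row[1] for row in array2D),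
--             sum(row[2] for row in array2D),
--             sum(row[-1] for row in array2D))
-- ===== Notes on version B (the rewrite author's own statement) =====
-- stated objective: simpler
-- what changed: Replaces the index-driven single loop maintaining four accumulators with four independent generator-expression column sums over the rows themselves.
import Mathlib
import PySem

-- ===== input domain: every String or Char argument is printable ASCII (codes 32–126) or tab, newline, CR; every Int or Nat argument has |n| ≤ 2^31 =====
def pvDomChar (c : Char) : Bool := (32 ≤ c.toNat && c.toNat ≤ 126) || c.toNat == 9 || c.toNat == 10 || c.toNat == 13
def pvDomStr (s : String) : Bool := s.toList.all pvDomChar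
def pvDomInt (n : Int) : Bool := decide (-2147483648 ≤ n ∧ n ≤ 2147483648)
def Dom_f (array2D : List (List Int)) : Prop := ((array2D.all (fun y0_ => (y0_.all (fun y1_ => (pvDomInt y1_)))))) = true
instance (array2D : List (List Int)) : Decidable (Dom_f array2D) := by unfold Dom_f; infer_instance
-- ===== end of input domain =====

-- B replaces A's single index loop with four accumulators by four independent column sums (same O(n) cost, plainer code).


-- ===== PORT A =====
-- one loop over indices, four running sums; pyGetD's default is never used inside Pre_f
def f (array2D : List (List Int)) : Int × Int × Int × Int :=
  (PySem.List.pyRange 0 (array2D.length : Int) 1).foldl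
    (fun (s : Int × Int × Int × Int) i =>
      (s.1 + PySem.List.pyGetD (PySem.List.pyGetD array2D i []) 0 0,
       s.2.1 + PySem.List.pyGetD (PySem.List.pyGetD array2D i []) 1 0,
       s.2.2.1 + PySem.List.pyGetD (PySem.List.pyGetD array2D i []) 2 0,
       s.2.2.2 + PySem.List.pyGetD (PySem.List.pyGetD array2D i []) (-1) 0))
    (0, 0, 0, 0)

-- ===== PORT B =====
-- four independent column sums over the rows
def f_alt (array2D : List (List Int)) : Int × Int × Int × Int :=
  ((array2D.map (fun row => PySem.List.pyGetD row 0 0)).sum,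
   (array2D.map (fun row => PySem.List.pyGetD row 1 0)).sum,
   (array2D.map (fun row => PySem.List.pyGetD row 2 0)).sum,
   (array2D.map (fun row => PySem.List.pyGetD row (-1) 0)).sum)

-- ===== PRECONDITION & SPEC =====
-- A (and B) raise IndexError on any row of length < 3 (row[2], and row[-1] on an empty row); exactly those inputs are excluded.
def Pre_f (array2D : List (List Int)) : Prop := ∀ row ∈ array2D, 3 ≤ row.length
instance (array2D : List (List Int)) : Decidable (Pre_f array2D) := by unfold Pre_f; infer_instance
def pvWitness_f : List (List Int) := [[3, 6, 2, 7], [9, 5, 4, 0], [2, 8, 0, 9]]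
def Spec_f (array2D : List (List Int)) (out : Int × Int × Int × Int) : Prop := out = f_alt array2D
instance (array2D : List (List Int)) (out : Int × Int × Int × Int) : Decidable (Spec_f array2D out) := by unfold Spec_f; infer_instance

-- ===== CLAIM (what is proved, stated in full; the proofs are below) =====
def Claim_equal_f : Prop := ∀ (array2D : List (List Int)), Dom_f array2D → Pre_f array2D → Spec_f array2D (f array2D)

-- ===== LEMMAS AND PROOFS =====
theorem f_fold_sums (a : List (List Int)) (i0 i1 i2 i3 : Int) :
    a.foldl
      (fun (s : Int × Int × Int × Int) row =>
        (s.1 + PySem.List.pyGetD row 0 0,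
         s.2.1 + PySem.List.pyGetD row 1 0,
         s.2.2.1 + PySem.List.pyGetD row 2 0,
         s.2.2.2 + PySem.List.pyGetD row (-1) 0)) (i0, i1, i2, i3)
    = (i0 + (a.map (fun row => PySem.List.pyGetD row 0 0)).sum,
       i1 + (a.map (fun row => PySem.List.pyGetD row 1 0)).sum,
       i2 + (a.map (fun row => PySem.List.pyGetD row 2 0)).sum,
       i3 + (a.map (fun row => PySem.List.pyGetD row (-1) 0)).sum) := by
  induction a generalizing i0 i1 i2 i3 with
  | nil => simp
  | cons h t ih => simp [List.foldl_cons, ih, add_assoc]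

-- ===== VERDICT (by name: the statement is the Claim_ definition above) =====
theorem f_spec : Claim_equal_f := by
  intro a _ _
  unfold Spec_f f f_alt
  have h := PySem.List.foldl_pyRange_zero_pyGetD' a ([] : List Int)
    (fun (s : Int × Int × Int × Int) row =>
      (s.1 + PySem.List.pyGetD row 0 0,
       s.2.1 + PySem.List.pyGetD row 1 0,
       s.2.2.1 + PySem.List.pyGetD row 2 0,
       s.2.2.2 + PySem.List.pyGetD row (-1) 0))
    ((0, 0, 0, 0) : Int × Int × Int × Int)
  simp only [h, f_fold_sums]
  simp
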